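-- pv_equiv track=rewrite | github.com/Shrey4299/study-material | python/recursion.py | insert_last
-- ===== SOURCE A (Python) =====
-- def insert_last(arr, element):
--     # Base case: If the array is empty or the element is greater than the last item
--     if not arr:
--         arr.append(element)
--         return arr
--
--     last = arr.pop()
--
--     insert_last(arr, element)
--
--     arr.append(last)
--
--     return arr
-- ===== SOURCE B (Python) =====
-- def insert_last(arr, element):
--     arr.insert(0, element)
--     return arr
-- ===== Notes on version B (the rewrite author's own statement) =====
-- stated objective: simpler
-- what changed: Replaces the recursive pop/recurse/append front-insert with a single in-place arr.insert(0, element) call and returns arr.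
import Mathlib
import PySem

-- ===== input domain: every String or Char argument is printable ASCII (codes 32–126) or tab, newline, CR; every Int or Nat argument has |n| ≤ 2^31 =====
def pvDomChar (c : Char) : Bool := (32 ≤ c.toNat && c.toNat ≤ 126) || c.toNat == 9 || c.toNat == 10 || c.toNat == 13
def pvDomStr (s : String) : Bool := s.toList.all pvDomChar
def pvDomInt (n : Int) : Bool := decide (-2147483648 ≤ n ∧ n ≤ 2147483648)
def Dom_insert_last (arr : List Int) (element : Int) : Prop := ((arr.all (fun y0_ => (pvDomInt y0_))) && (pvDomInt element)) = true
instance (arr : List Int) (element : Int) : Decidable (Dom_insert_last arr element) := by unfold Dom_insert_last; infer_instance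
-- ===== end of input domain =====

-- Header: B replaces A's recursive pop/recurse/append with a single list.insert(0, element);
-- equivalence is about the RETURN value (in Python both mutate arr into the same final state).

-- ===== PORT A =====
-- A: if arr empty, append element; else pop last, recurse, append last back.
def insert_last (arr : List Int) (element : Int) : List Int :=
  if h : arr = [] then [element]
  else insert_last arr.dropLast element ++ [arr.getLast h]
termination_by arr.length
decreasing_by
  have : 0 < arr.length := List.length_pos_iff.mpr h
  simp [List.length_dropLast]; omega

-- ===== PORT B =====
def insert_last_alt (arr : List Int) (element : Int) : List Int :=
  element :: arr

-- ===== PRECONDITION & SPEC =====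
def Spec_insert_last (arr : List Int) (element : Int) (out : List Int) : Prop := out = insert_last_alt arr element
instance (arr : List Int) (element : Int) (out : List Int) : Decidable (Spec_insert_last arr element out) := by unfold Spec_insert_last; infer_instance

-- ===== CLAIM (what is proved, stated in full; the proofs are below) =====
def Claim_equal_insert_last : Prop := ∀ (arr : List Int) (element : Int), Dom_insert_last arr element → Spec_insert_last arr element (insert_last arr element)

-- ===== LEMMAS AND PROOFS =====
theorem insert_last_eq_cons (arr : List Int) (element : Int) :
    insert_last arr element = element :: arr := by
  induction hn : arr.length using Nat.strong_induction_on generalizing arr with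
  | _ n ih =>
    by_cases h : arr = []
    · simp [insert_last, h]
    · rw [insert_last]
      simp only [h, dite_false]
      have hlt : arr.dropLast.length < n := by
        have : 0 < arr.length := List.length_pos_iff.mpr h
        simp [List.length_dropLast]; omega
      rw [ih _ hlt arr.dropLast rfl]
      simp [List.dropLast_concat_getLast h]

-- ===== VERDICT (by name: the statement is the Claim_ definition above) =====
theorem insert_last_spec : Claim_equal_insert_last := by
  intro arr element _
  unfold Spec_insert_last insert_last_alt
  exact insert_last_eq_cons arr element
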